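-- pv_equiv track=rewrite | github.com/leduyhai2004/Python-ss1 | chap2/ex6.py | readFourDigits
-- ===== SOURCE A (Python) =====
-- def readFourDigits(number):
--     # Special case for zero
--     if number == 0:
--         return 'zero'
--
--     # Define word mappings
--     ones = ['', 'one', 'two', 'three', 'four', 'five', 'six', 'seven', 'eight', 'nine']
--     teens = ['ten', 'eleven', 'twelve', 'thirteen', 'fourteen', 'fifteen',
--              'sixteen', 'seventeen', 'eighteen', 'nineteen']
--     tens = ['', '', 'twenty', 'thirty', 'forty', 'fifty', 'sixty', 'seventy', 'eighty', 'ninety']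
--
--     result = []
--
--     # Extract digits
--     thousands = number // 1000
--     hundreds = (number % 1000) // 100
--     remainder = number % 100
--
--     # Handle thousands
--     if thousands > 0:
--         result.append(ones[thousands])
--         result.append('thousand')
--
--     # Handle hundreds
--     if hundreds > 0:
--         result.append(ones[hundreds])
--         result.append('hundred')
--
--     # Handle tens and ones
--     if remainder >= 20:
--         tens_digit = remainder // 10
--         ones_digit = remainder % 10
--         result.append(tens[tens_digit])
--         if ones_digit > 0:
--             result.append(ones[ones_digit])
--     elif remainder >= 10:
--         # Handle teens (10-19)
--         result.append(teens[remainder - 10])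
--     elif remainder > 0:
--         # Handle single digits (1-9)
--         result.append(ones[remainder])
--
--     # Join with 'and' where appropriate
--     final_result = []
--     i = 0
--     while i < len(result):
--         if i > 0 and (result[i-1] == 'thousand' or result[i-1] == 'hundred'):
--             final_result.append('and')
--         final_result.append(result[i])
--         i += 1
--
--     return ' '.join(final_result)
-- ===== SOURCE B (Python) =====
-- def readFourDigits(number):
--     # Table-driven: precompute every 0-99 phrase once, then one uniform loop
--     # over the (divisor, modulus, unit) scales; no tens/teens branch cascade
--     # and no token list with 'and'-splicing.
--     if number == 0:
--         return 'zero'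
--
--     ones = ['', 'one', 'two', 'three', 'four', 'five', 'six', 'seven', 'eight', 'nine']
--     teens = ['ten', 'eleven', 'twelve', 'thirteen', 'fourteen', 'fifteen',
--              'sixteen', 'seventeen', 'eighteen', 'nineteen']
--     tens = ['', '', 'twenty', 'thirty', 'forty', 'fifty', 'sixty', 'seventy', 'eighty', 'ninety']
--     under100 = ones + teens + [tens[t] + (' ' + ones[o] if o else '')
--                                for t in range(2, 10) for o in range(10)]
--
--     segments = []
--     for div, mod, unit in ((1000, 0, ' thousand'), (100, 10, ' hundred'), (1, 100, '')):
--         d = number // div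
--         if mod:
--             d %= mod
--         if d > 0:
--             segments.append(under100[d] + unit)
--     return ' and '.join(segments)
-- ===== Notes on version B (the rewrite author's own statement) =====
-- stated objective: alternative
-- what changed: Replaces A's branch cascade over the 0-99 remainder plus a flat token list with a second while-loop splicing 'and' tokens by a precomputed table of all 100 phrases for 0-99 and one uniform loop over (divisor, modulus, unit) scales whose segments are joined once with ' and '.
-- crash fix: On 10000 <= number < 100000 A raises IndexError (ones[number//1000] with a two-digit index) while B's 0-99 table covers the index and returns the phrase, e.g. 'ten thousand' for 10000. — e.g. on readFourDigits(10000): A raises IndexError, B returns "ten thousand"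
import Mathlib
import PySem

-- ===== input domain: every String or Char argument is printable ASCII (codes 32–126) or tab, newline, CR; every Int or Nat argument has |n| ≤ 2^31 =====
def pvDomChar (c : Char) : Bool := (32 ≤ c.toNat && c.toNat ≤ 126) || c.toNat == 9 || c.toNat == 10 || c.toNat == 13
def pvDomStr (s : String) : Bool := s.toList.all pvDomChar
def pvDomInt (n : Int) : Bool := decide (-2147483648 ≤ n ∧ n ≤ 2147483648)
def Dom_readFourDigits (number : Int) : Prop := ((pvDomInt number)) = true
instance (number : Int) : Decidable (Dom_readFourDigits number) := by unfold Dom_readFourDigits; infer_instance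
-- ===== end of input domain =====

-- B replaces A's tens/teens branch cascade + token list with 'and'-splicing while-loop by a
-- precomputed 0-99 phrase table and one uniform loop over scales (objective: alternative).


-- ===== PORT A =====
-- A's final while-loop; the fuel argument (= result.length at the call site) only makes
-- the loop total, the state and the steps are the Python's.
def pvJoinAnd (result : List String) : Nat → Nat → List String → List String
  | 0, _, final => final
  | fuel+1, i, final =>
    if i < result.length then
      let final := if 0 < i ∧ (PySem.List.pyGetD result ((i:Int) - 1) "" = "thousand" ∨ PySem.List.pyGetD result ((i:Int) - 1) "" = "hundred") then final ++ ["and"] else final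
      pvJoinAnd result fuel (i+1) (final ++ [PySem.List.pyGetD result (i:Int) ""])
    else final

def readFourDigits (number : Int) : String :=
  if number = 0 then "zero" else
  let ones : List String := ["", "one", "two", "three", "four", "five", "six", "seven", "eight", "nine"]
  let teens : List String := ["ten", "eleven", "twelve", "thirteen", "fourteen", "fifteen", "sixteen", "seventeen", "eighteen", "nineteen"]
  let tens : List String := ["", "", "twenty", "thirty", "forty", "fifty", "sixty", "seventy", "eighty", "ninety"]
  let result : List String := []
  let thousands := PySem.Int.floordiv number 1000
  let hundreds := PySem.Int.floordiv (PySem.Int.mod number 1000) 100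
  let remainder := PySem.Int.mod number 100
  let result := if thousands > 0 then result ++ [PySem.List.pyGetD ones thousands ""] ++ ["thousand"] else result
  let result := if hundreds > 0 then result ++ [PySem.List.pyGetD ones hundreds ""] ++ ["hundred"] else result
  let result :=
    if remainder ≥ 20 then
      let tens_digit := PySem.Int.floordiv remainder 10
      let ones_digit := PySem.Int.mod remainder 10
      let result := result ++ [PySem.List.pyGetD tens tens_digit ""]
      if ones_digit > 0 then result ++ [PySem.List.pyGetD ones ones_digit ""] else result
    else if remainder ≥ 10 then result ++ [PySem.List.pyGetD teens (remainder - 10) ""]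
    else if remainder > 0 then result ++ [PySem.List.pyGetD ones remainder ""]
    else result
  PySem.Str.join " " (pvJoinAnd result result.length 0 [])

-- ===== PORT B =====
-- Source B's precomputed table of the phrases for 0..99 (ones ++ teens ++ the comprehension
-- over t in range(2,10), o in range(10)); hoisted to a def because it is a constant.
def pvUnder100 : List String :=
  ["", "one", "two", "three", "four", "five", "six", "seven", "eight", "nine"] ++
  ["ten", "eleven", "twelve", "thirteen", "fourteen", "fifteen", "sixteen", "seventeen", "eighteen", "nineteen"] ++
  (PySem.List.pyRange 2 10 1).flatMap (fun t =>
    (PySem.List.pyRange 0 10 1).map (fun o =>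
      PySem.List.pyGetD ["", "", "twenty", "thirty", "forty", "fifty", "sixty", "seventy", "eighty", "ninety"] t "" ++
      (if o ≠ 0 then " " ++ PySem.List.pyGetD ["", "one", "two", "three", "four", "five", "six", "seven", "eight", "nine"] o "" else "")))

def readFourDigits_alt (number : Int) : String :=
  if number = 0 then "zero" else
  let scales : List (Int × Int × String) := [(1000, 0, " thousand"), (100, 10, " hundred"), (1, 100, "")]
  let segments := scales.foldl (fun segs p =>
    let d := PySem.Int.floordiv number p.1
    let d := if p.2.1 ≠ 0 then PySem.Int.mod d p.2.1 else d
    if d > 0 then segs ++ [PySem.List.pyGetD pvUnder100 d "" ++ p.2.2] else segs) ([] : List String)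
  PySem.Str.join " and " segments

-- ===== PRECONDITION & SPEC =====
-- Pre_ excludes exactly the inputs where A raises: number ≥ 10000 makes number // 1000 ≥ 10
-- and ones[thousands] raises IndexError.
def Pre_readFourDigits (number : Int) : Prop := number < 10000
instance (number : Int) : Decidable (Pre_readFourDigits number) := by unfold Pre_readFourDigits; infer_instance
def pvWitness_readFourDigits : Int := (1234)

-- On 10000 ≤ number < 100000 A raises IndexError (ones[number//1000] with a two-digit index)
-- while B's 0-99 table covers the index and returns the phrase.
def Raises_readFourDigits (number : Int) : Prop := 10000 ≤ number ∧ number < 100000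
instance (number : Int) : Decidable (Raises_readFourDigits number) := by unfold Raises_readFourDigits; infer_instance
def pvRaiseWitness_readFourDigits : Int := (10000)
def pvRaiseWitnessOut_readFourDigits : String := "ten thousand"

def Spec_readFourDigits (number : Int) (out : String) : Prop := out = readFourDigits_alt number
instance (number : Int) (out : String) : Decidable (Spec_readFourDigits number out) := by unfold Spec_readFourDigits; infer_instance

-- ===== CLAIM (what is proved, stated in full; the proofs are below) =====
def Claim_equal_readFourDigits : Prop := ∀ (number : Int), Dom_readFourDigits number → Pre_readFourDigits number → Spec_readFourDigits number (readFourDigits number)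
def Claim_raises_readFourDigits : Prop := (∀ (number : Int), Dom_readFourDigits number → Raises_readFourDigits number → ¬ Pre_readFourDigits number) ∧ (Dom_readFourDigits (pvRaiseWitness_readFourDigits) ∧ Raises_readFourDigits (pvRaiseWitness_readFourDigits) ∧ readFourDigits_alt (pvRaiseWitness_readFourDigits) = pvRaiseWitnessOut_readFourDigits)

-- ===== LEMMAS AND PROOFS =====

-- proof-side helpers: A's body after the zero-guard, with the three digit
-- expressions abstracted as t, h, r (definitionally equal to the port's else-branch)
def pvR (t h r : Int) : List String :=
  let r1 : List String := if t > 0 then ([] : List String) ++ [PySem.List.pyGetD ["", "one", "two", "three", "four", "five", "six", "seven", "eight", "nine"] t ""] ++ ["thousand"] else []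
  let r2 : List String := if h > 0 then r1 ++ [PySem.List.pyGetD ["", "one", "two", "three", "four", "five", "six", "seven", "eight", "nine"] h ""] ++ ["hundred"] else r1
  if r ≥ 20 then
    if PySem.Int.mod r 10 > 0 then
      r2 ++ [PySem.List.pyGetD ["", "", "twenty", "thirty", "forty", "fifty", "sixty", "seventy", "eighty", "ninety"] (PySem.Int.floordiv r 10) ""] ++ [PySem.List.pyGetD ["", "one", "two", "three", "four", "five", "six", "seven", "eight", "nine"] (PySem.Int.mod r 10) ""]
    else r2 ++ [PySem.List.pyGetD ["", "", "twenty", "thirty", "forty", "fifty", "sixty", "seventy", "eighty", "ninety"] (PySem.Int.floordiv r 10) ""]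
  else if r ≥ 10 then r2 ++ [PySem.List.pyGetD ["ten", "eleven", "twelve", "thirteen", "fourteen", "fifteen", "sixteen", "seventeen", "eighteen", "nineteen"] (r - 10) ""]
  else if r > 0 then r2 ++ [PySem.List.pyGetD ["", "one", "two", "three", "four", "five", "six", "seven", "eight", "nine"] r ""]
  else r2

-- the same segments written per group, joined with " and " (= what pvJoinAnd amounts to)
def pvS (t h r : Int) : List String :=
  let s1 : List String := if t > 0 then ([] : List String) ++ [PySem.List.pyGetD ["", "one", "two", "three", "four", "five", "six", "seven", "eight", "nine"] t "" ++ " thousand"] else []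
  let s2 : List String := if h > 0 then s1 ++ [PySem.List.pyGetD ["", "one", "two", "three", "four", "five", "six", "seven", "eight", "nine"] h "" ++ " hundred"] else s1
  if r ≥ 20 then
    s2 ++ [if PySem.Int.mod r 10 > 0 then PySem.List.pyGetD ["", "", "twenty", "thirty", "forty", "fifty", "sixty", "seventy", "eighty", "ninety"] (PySem.Int.floordiv r 10) "" ++ " " ++ PySem.List.pyGetD ["", "one", "two", "three", "four", "five", "six", "seven", "eight", "nine"] (PySem.Int.mod r 10) "" else PySem.List.pyGetD ["", "", "twenty", "thirty", "forty", "fifty", "sixty", "seventy", "eighty", "ninety"] (PySem.Int.floordiv r 10) ""]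
  else if r ≥ 10 then s2 ++ [PySem.List.pyGetD ["ten", "eleven", "twelve", "thirteen", "fourteen", "fifteen", "sixteen", "seventeen", "eighteen", "nineteen"] (r - 10) ""]
  else if r > 0 then s2 ++ [PySem.List.pyGetD ["", "one", "two", "three", "four", "five", "six", "seven", "eight", "nine"] r ""]
  else s2

theorem pv_tableNe (L : List String) (i : Int) (s : String) (h1 : s ∉ L) (h2 : s ≠ "") :
    PySem.List.pyGetD L i "" ≠ s := by
  by_cases hr : PySem.Raise.InRange L.length i
  · intro e
    exact h1 (e ▸ PySem.List.pyGetD_mem L "" hr)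
  · have hn := (PySem.List.pyGet?_eq_none_iff L i).mpr hr
    simp [PySem.List.pyGetD, hn]
    exact h2

theorem pv_ones_th (i : Int) : PySem.List.pyGetD ["", "one", "two", "three", "four", "five", "six", "seven", "eight", "nine"] i "" ≠ "thousand" := pv_tableNe _ i _ (by decide) (by decide)
theorem pv_ones_hu (i : Int) : PySem.List.pyGetD ["", "one", "two", "three", "four", "five", "six", "seven", "eight", "nine"] i "" ≠ "hundred" := pv_tableNe _ i _ (by decide) (by decide)
theorem pv_teens_th (i : Int) : PySem.List.pyGetD ["ten", "eleven", "twelve", "thirteen", "fourteen", "fifteen", "sixteen", "seventeen", "eighteen", "nineteen"] i "" ≠ "thousand" := pv_tableNe _ i _ (by decide) (by decide)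
theorem pv_teens_hu (i : Int) : PySem.List.pyGetD ["ten", "eleven", "twelve", "thirteen", "fourteen", "fifteen", "sixteen", "seventeen", "eighteen", "nineteen"] i "" ≠ "hundred" := pv_tableNe _ i _ (by decide) (by decide)
theorem pv_tens_th (i : Int) : PySem.List.pyGetD ["", "", "twenty", "thirty", "forty", "fifty", "sixty", "seventy", "eighty", "ninety"] i "" ≠ "thousand" := pv_tableNe _ i _ (by decide) (by decide)
theorem pv_tens_hu (i : Int) : PySem.List.pyGetD ["", "", "twenty", "thirty", "forty", "fifty", "sixty", "seventy", "eighty", "ninety"] i "" ≠ "hundred" := pv_tableNe _ i _ (by decide) (by decide)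

set_option maxHeartbeats 1000000 in
theorem pv_key (t h r : Int) :
    PySem.Str.join " " (pvJoinAnd (pvR t h r) (pvR t h r).length 0 []) =
    PySem.Str.join " and " (pvS t h r) := by
  unfold pvR pvS
  dsimp only
  split_ifs <;>
    (simp only [List.nil_append, List.cons_append, List.append_assoc, pvJoinAnd,
        List.length_cons, List.length_nil];
     try norm_num [PySem.List.pyGetD_ofNat', pv_ones_th, pv_ones_hu, pv_teens_th, pv_teens_hu, pv_tens_th, pv_tens_hu];
     try (refine String.toList_inj.mp ?_;
          simp [PySem.Str.toList_join, PySem.Chars.join_cons_cons, PySem.Chars.join_singleton,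
            PySem.Chars.join_nil, String.toList_append]))

-- the phrase A builds for the remainder r, as one string
def pvRestVal (r : Int) : String :=
  if r ≥ 20 then (if PySem.Int.mod r 10 > 0 then PySem.List.pyGetD ["", "", "twenty", "thirty", "forty", "fifty", "sixty", "seventy", "eighty", "ninety"] (PySem.Int.floordiv r 10) "" ++ " " ++ PySem.List.pyGetD ["", "one", "two", "three", "four", "five", "six", "seven", "eight", "nine"] (PySem.Int.mod r 10) "" else PySem.List.pyGetD ["", "", "twenty", "thirty", "forty", "fifty", "sixty", "seventy", "eighty", "ninety"] (PySem.Int.floordiv r 10) "")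
  else if r ≥ 10 then PySem.List.pyGetD ["ten", "eleven", "twelve", "thirteen", "fourteen", "fifteen", "sixteen", "seventeen", "eighteen", "nineteen"] (r - 10) ""
  else PySem.List.pyGetD ["", "one", "two", "three", "four", "five", "six", "seven", "eight", "nine"] r ""

set_option maxHeartbeats 2000000 in
theorem pv_u100_ones (i : Int) (h1 : 0 < i) (h2 : i < 10) :
    PySem.List.pyGetD pvUnder100 i "" = PySem.List.pyGetD ["", "one", "two", "three", "four", "five", "six", "seven", "eight", "nine"] i "" := by
  interval_cases i <;> decide

set_option maxHeartbeats 4000000 in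
theorem pv_u100_rest (r : Int) (h1 : 0 ≤ r) (h2 : r < 100) :
    PySem.List.pyGetD pvUnder100 r "" = pvRestVal r := by
  interval_cases r <;> decide

theorem pv_rpart (s : List String) (r : Int) (h1 : 0 ≤ r) (h2 : r < 100) :
    (if r ≥ 20 then
      s ++ [if PySem.Int.mod r 10 > 0 then PySem.List.pyGetD ["", "", "twenty", "thirty", "forty", "fifty", "sixty", "seventy", "eighty", "ninety"] (PySem.Int.floordiv r 10) "" ++ " " ++ PySem.List.pyGetD ["", "one", "two", "three", "four", "five", "six", "seven", "eight", "nine"] (PySem.Int.mod r 10) "" else PySem.List.pyGetD ["", "", "twenty", "thirty", "forty", "fifty", "sixty", "seventy", "eighty", "ninety"] (PySem.Int.floordiv r 10) ""]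
    else if r ≥ 10 then s ++ [PySem.List.pyGetD ["ten", "eleven", "twelve", "thirteen", "fourteen", "fifteen", "sixteen", "seventeen", "eighteen", "nineteen"] (r - 10) ""]
    else if r > 0 then s ++ [PySem.List.pyGetD ["", "one", "two", "three", "four", "five", "six", "seven", "eight", "nine"] r ""]
    else s)
    = s ++ (if r > 0 then [PySem.List.pyGetD pvUnder100 r ""] else []) := by
  rw [pv_u100_rest r h1 h2]
  unfold pvRestVal
  split_ifs <;> simp_all <;> omega

-- pvS, rewritten as B's per-scale segments with pvUnder100 lookups
theorem pv_BS (t h r : Int) (ht : t < 10) (hh : h < 10) (hr0 : 0 ≤ r) (hr : r < 100) :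
    pvS t h r =
      (if t > 0 then [PySem.List.pyGetD pvUnder100 t "" ++ " thousand"] else []) ++
      (if h > 0 then [PySem.List.pyGetD pvUnder100 h "" ++ " hundred"] else []) ++
      (if r > 0 then [PySem.List.pyGetD pvUnder100 r ""] else []) := by
  unfold pvS
  dsimp only
  rw [pv_rpart _ r hr0 hr]
  congr 1
  split_ifs with a b c
  · rw [pv_u100_ones t b ht, pv_u100_ones h a hh]; try simp
  · rw [pv_u100_ones h a hh]; try simp
  · rw [pv_u100_ones t c ht]; try simp
  · try simp

theorem pv_B_eq (n : Int) (hn : ¬ n = 0) :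
    readFourDigits_alt n = PySem.Str.join " and "
      ((if PySem.Int.floordiv n 1000 > 0 then [PySem.List.pyGetD pvUnder100 (PySem.Int.floordiv n 1000) "" ++ " thousand"] else []) ++
       (if PySem.Int.floordiv (PySem.Int.mod n 1000) 100 > 0 then [PySem.List.pyGetD pvUnder100 (PySem.Int.floordiv (PySem.Int.mod n 1000) 100) "" ++ " hundred"] else []) ++
       (if PySem.Int.mod n 100 > 0 then [PySem.List.pyGetD pvUnder100 (PySem.Int.mod n 100) ""] else [])) := by
  simp only [readFourDigits_alt, if_neg hn, List.foldl]
  norm_num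
  rw [show n / 100 % 10 = n % 1000 / 100 from by omega]
  split_ifs <;> simp

-- ===== VERDICT (by name: the statement is the Claim_ definition above) =====
theorem readFourDigits_spec : Claim_equal_readFourDigits := by
  intro number _ hpre
  unfold Spec_readFourDigits
  by_cases h0 : number = 0
  · simp [h0, readFourDigits, readFourDigits_alt]
  · have ht : PySem.Int.floordiv number 1000 < 10 := by
      rw [PySem.Int.floordiv_eq_ediv_of_pos (by norm_num)]
      unfold Pre_readFourDigits at hpre
      omega
    have hh : PySem.Int.floordiv (PySem.Int.mod number 1000) 100 < 10 := by
      rw [PySem.Int.floordiv_eq_ediv_of_pos (by norm_num), PySem.Int.mod_eq_emod_of_pos (by norm_num)]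
      omega
    have hr0 : 0 ≤ PySem.Int.mod number 100 := by
      rw [PySem.Int.mod_eq_emod_of_pos (by norm_num)]; omega
    have hr : PySem.Int.mod number 100 < 100 := by
      rw [PySem.Int.mod_eq_emod_of_pos (by norm_num)]; omega
    have hA : readFourDigits number = PySem.Str.join " and "
        (pvS (PySem.Int.floordiv number 1000) (PySem.Int.floordiv (PySem.Int.mod number 1000) 100) (PySem.Int.mod number 100)) := by
      unfold readFourDigits
      rw [if_neg h0]
      exact pv_key _ _ _
    rw [hA, pv_BS _ _ _ ht hh hr0 hr, pv_B_eq number h0]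

set_option maxRecDepth 10000 in
@[simp] theorem readFourDigits_raises : Claim_raises_readFourDigits := by
  unfold Claim_raises_readFourDigits
  refine ⟨?_, by decide⟩
  intro n _ hr
  unfold Raises_readFourDigits at hr
  unfold Pre_readFourDigits
  omega
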